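-- pv_equiv track=rewrite | github.com/mstretavsky/AOC | 2023/Day13_B.py | GetMirroredLines2
-- ===== SOURCE A (Python) =====
-- def GetMirroredLines(mirrors:[]):
--     for i in range(1, len(mirrors)):
--         abovemirror = mirrors[:i][::-1]
--         bellowmirror = mirrors[i:]
--
--         abovemirror = abovemirror[:len(bellowmirror)]
--         bellowmirror = bellowmirror[:len(abovemirror)]
--
--         if abovemirror == bellowmirror:
--             return i
--     return 0
--
-- def oposite(symbol:str):
--     if symbol == '#':
--         return '.'
--     return '#'
--
-- def GetMirroredLines2(mirrors:[], originmirroredlines:int):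
--     anothermirroredlines = 0
--     for j in [0, len(mirrors)-1]:
--         for k in range(len(mirrors[j])):
--             mirrors[j][k] =  oposite(mirrors[j][k])
--             anothermirroredlines = GetMirroredLines(mirrors)
--             mirrors[j][k] =  oposite(mirrors[j][k])
--             if anothermirroredlines > 0 and anothermirroredlines != originmirroredlines:
--                 return anothermirroredlines
--     return 0
-- ===== SOURCE B (Python) =====
-- def GetMirroredLines2(mirrors, originmirroredlines):
--     # Works on a copy of the grid; the return value is what matters.
--     # Per pass, keeps the mismatch count between the toggled row and every
--     # other row, updated in O(rows) per toggle, so each mirror candidate is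
--     # decided by count lookups / direct row comparisons instead of rebuilding
--     # and comparing reversed slices for every single-cell flip.
--     n = len(mirrors)
--     grid = [list(row) for row in mirrors]
--
--     def rowdiff(r1, r2):
--         return abs(len(r1) - len(r2)) + sum(a != b for a, b in zip(r1, r2))
--
--     def flip(c):
--         return '.' if c == '#' else '#'
--
--     for j in (0, n - 1):
--         row = grid[j]
--         diffj = [rowdiff(row, r) for r in grid]
--
--         def toggle(k):
--             old = row[k]
--             new = flip(old)
--             row[k] = new
--             for q in range(n):
--                 r = grid[q]
--                 if q != j and k < len(r):
--                     diffj[q] += (new != r[k]) - (old != r[k])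
--
--         for k in range(len(row)):
--             toggle(k)
--             m = 0
--             for i in range(1, n):
--                 ok = True
--                 for t in range(min(i, n - i)):
--                     p, q = i - 1 - t, i + t
--                     if p == j or q == j:
--                         ok = diffj[q if p == j else p] == 0
--                     else:
--                         ok = grid[p] == grid[q]
--                     if not ok:
--                         break
--                 if ok:
--                     m = i
--                     break
--             toggle(k)
--             if m > 0 and m != originmirroredlines:
--                 return m
--     return 0
-- ===== Notes on version B (the rewrite author's own statement) =====
-- stated objective: faster
-- what changed: Instead of rebuilding and comparing reversed slices of the whole grid for every single-cell flip, B keeps per-pass mismatch counts between the toggled row and every other row (updated in O(rows) per toggle) and decides each mirror pair by a count lookup or one direct row comparison; Pre_ only excludes the empty grid, on which A raises IndexError; B is pure (works on a copy; A mutates its argument, equivalence is about the return value).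
import Mathlib
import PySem

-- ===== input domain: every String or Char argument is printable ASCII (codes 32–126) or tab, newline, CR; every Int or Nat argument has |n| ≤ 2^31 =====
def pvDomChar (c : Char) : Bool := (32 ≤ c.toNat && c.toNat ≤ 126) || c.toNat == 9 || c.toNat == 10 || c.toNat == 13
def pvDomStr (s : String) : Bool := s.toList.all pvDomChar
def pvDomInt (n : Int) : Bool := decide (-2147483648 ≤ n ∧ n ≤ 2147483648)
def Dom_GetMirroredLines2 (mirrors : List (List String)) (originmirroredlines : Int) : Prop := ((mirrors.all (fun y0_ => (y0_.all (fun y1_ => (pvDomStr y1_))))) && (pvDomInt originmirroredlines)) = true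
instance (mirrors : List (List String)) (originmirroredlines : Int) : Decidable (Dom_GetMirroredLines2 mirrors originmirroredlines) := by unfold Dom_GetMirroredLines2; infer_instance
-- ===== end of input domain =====

-- B keeps per-pass mismatch counts between the toggled row and every other row (updated in
-- O(rows) per toggle) instead of rebuilding and comparing reversed slices for every flip;
-- A mutates its argument in place, B works on a copy — the equivalence is about the RETURN
-- value only.

-- ===== PORT A =====
def pvOposite (symbol : String) : String := if symbol = "#" then "." else "#"

def pvGMLloop (mirrors : List (List String)) : List Int → Int
  | [] => 0
  | i :: rest =>
    let abovemirror := (PySem.List.slice? (PySem.List.slice mirrors none (some i)) none none (-1)).getD []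
    let bellowmirror := PySem.List.slice mirrors (some i) none
    let abovemirror2 := PySem.List.slice abovemirror none (some (bellowmirror.length : Int))
    let bellowmirror2 := PySem.List.slice bellowmirror none (some (abovemirror2.length : Int))
    if abovemirror2 = bellowmirror2 then i else pvGMLloop mirrors rest

def pvGetMirroredLines (mirrors : List (List String)) : Int :=
  pvGMLloop mirrors (PySem.List.pyRange 1 (mirrors.length : Int) 1)

-- mirrors[j][k] = oposite(mirrors[j][k])   (in-range under Pre_)
def pvA2flip (g : List (List String)) (j k : Int) : List (List String) :=
  let row := PySem.List.pyGetD g j []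
  PySem.List.pySetD g j (PySem.List.pySetD row k (pvOposite (PySem.List.pyGetD row k "")))

def pvA2kloop (origin : Int) (j : Int) : List Int → List (List String) → (List (List String) × Option Int)
  | [], g => (g, none)
  | k :: ks, g =>
    let g1 := pvA2flip g j k
    let m := pvGetMirroredLines g1
    let g2 := pvA2flip g1 j k
    if m > 0 ∧ m ≠ origin then (g2, some m)
    else pvA2kloop origin j ks g2

def pvA2jloop (origin : Int) : List Int → List (List String) → Int
  | [], _ => 0
  | j :: js, g =>
    match pvA2kloop origin j (PySem.List.pyRange 0 (((PySem.List.pyGetD g j []) : List String).length : Int) 1) g with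
    | (_, some m) => m
    | (g', none) => pvA2jloop origin js g'

def GetMirroredLines2 (mirrors : List (List String)) (originmirroredlines : Int) : Int :=
  pvA2jloop originmirroredlines [0, (mirrors.length : Int) - 1] mirrors

-- ===== PORT B =====
-- rowdiff(r1, r2) = abs(len(r1)-len(r2)) + sum(a != b for a, b in zip(r1, r2))
def pvRowdiff (r1 r2 : List String) : Int :=
  |((r1.length : Int) - (r2.length : Int))| +
    ((r1.zip r2).countP (fun ab => decide (ab.1 ≠ ab.2)) : Int)

def pvFlip (c : String) : String := if c = "#" then "." else "#"

-- the body of toggle's update loop: 'r = grid[q]; if q != j and k < len(r): diffj[q] += ...'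
def pvStep (grid : List (List String)) (j k : Int) (nw old : String) (d : List Int) (q : Int) : List Int :=
  if q ≠ j ∧ k < ((PySem.List.pyGetD grid q []).length : Int) then
    PySem.List.pySetD d q (PySem.List.pyGetD d q 0
      + ((if nw ≠ PySem.List.pyGetD (PySem.List.pyGetD grid q []) k "" then 1 else 0)
         - (if old ≠ PySem.List.pyGetD (PySem.List.pyGetD grid q []) k "" then 1 else 0)))
  else d

-- toggle(k): flip row[k] in the grid and update the mismatch counts diffj
def pvToggle (j n : Int) (grid : List (List String)) (diffj : List Int) (k : Int) :
    List (List String) × List Int :=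
  let row := PySem.List.pyGetD grid j []
  let old := PySem.List.pyGetD row k ""
  let nw := pvFlip old
  let grid' := PySem.List.pySetD grid j (PySem.List.pySetD row k nw)
  (grid', (PySem.List.pyRange 0 n 1).foldl (pvStep grid' j k nw old) diffj)

def pvBok (j i : Int) (diffj : List Int) (grid : List (List String)) : List Int → Bool
  | [] => true
  | t :: ts =>
    let p := i - 1 - t
    let q := i + t
    if (if p = j ∨ q = j then
          PySem.List.pyGetD diffj (if p = j then q else p) 0 = 0
        else PySem.List.pyGetD grid p [] = PySem.List.pyGetD grid q [])
    then pvBok j i diffj grid ts else false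

def pvBfindm (j n : Int) (diffj : List Int) (grid : List (List String)) : List Int → Int
  | [] => 0
  | i :: is =>
    if pvBok j i diffj grid (PySem.List.pyRange 0 (min i (n - i)) 1) then i
    else pvBfindm j n diffj grid is

def pvBkloop (o n j : Int) : List Int → List (List String) → List Int → (List (List String) × List Int × Option Int)
  | [], grid, diffj => (grid, diffj, none)
  | k :: ks, grid, diffj =>
    let s1 := pvToggle j n grid diffj k
    let m := pvBfindm j n s1.2 s1.1 (PySem.List.pyRange 1 n 1)
    let s2 := pvToggle j n s1.1 s1.2 k
    if m > 0 ∧ m ≠ o then (s2.1, s2.2, some m)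
    else pvBkloop o n j ks s2.1 s2.2

def pvBjloop (o n : Int) : List Int → List (List String) → Int
  | [], _ => 0
  | j :: js, grid =>
    let row := PySem.List.pyGetD grid j []
    let diffj := grid.map (fun r => pvRowdiff row r)
    match pvBkloop o n j (PySem.List.pyRange 0 (row.length : Int) 1) grid diffj with
    | (_, _, some m) => m
    | (grid', _, none) => pvBjloop o n js grid'

def GetMirroredLines2_alt (mirrors : List (List String)) (originmirroredlines : Int) : Int :=
  pvBjloop originmirroredlines (mirrors.length : Int) [0, (mirrors.length : Int) - 1] mirrors

-- ===== PRECONDITION & SPEC =====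
-- On mirrors = [] the Python A raises IndexError (mirrors[-1]); that is the only exclusion.
def Pre_GetMirroredLines2 (mirrors : List (List String)) (originmirroredlines : Int) : Prop :=
  mirrors ≠ []
instance (mirrors : List (List String)) (originmirroredlines : Int) : Decidable (Pre_GetMirroredLines2 mirrors originmirroredlines) := by
  unfold Pre_GetMirroredLines2; infer_instance

def pvWitness_GetMirroredLines2 : List (List String) × Int := ([[ "#", "." ], [ "#", "." ]], 0)

def Spec_GetMirroredLines2 (mirrors : List (List String)) (originmirroredlines : Int) (out : Int) : Prop := out = GetMirroredLines2_alt mirrors originmirroredlines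
instance (mirrors : List (List String)) (originmirroredlines : Int) (out : Int) : Decidable (Spec_GetMirroredLines2 mirrors originmirroredlines out) := by unfold Spec_GetMirroredLines2; infer_instance

-- ===== CLAIM (what is proved, stated in full; the proofs are below) =====
def Claim_equal_GetMirroredLines2 : Prop := ∀ (mirrors : List (List String)) (originmirroredlines : Int), Dom_GetMirroredLines2 mirrors originmirroredlines → Pre_GetMirroredLines2 mirrors originmirroredlines → Spec_GetMirroredLines2 mirrors originmirroredlines (GetMirroredLines2 mirrors originmirroredlines)

-- ===== LEMMAS AND PROOFS =====

lemma pvRowdiff_char (r1 r2 : List String) :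
    pvRowdiff r1 r2 = |((r1.length : Int) - (r2.length : Int))| +
      ((r1.zip r2).countP (fun ab => decide (ab.1 ≠ ab.2)) : Int) := rfl

lemma pvRowdiff_nil_right (r1 : List String) : pvRowdiff r1 [] = (r1.length : Int) := by
  simp [pvRowdiff_char]

lemma pvRowdiff_nil_left (r2 : List String) : pvRowdiff [] r2 = (r2.length : Int) := by
  simp [pvRowdiff_char]

lemma pvRowdiff_cons (a b : String) (r1 r2 : List String) :
    pvRowdiff (a :: r1) (b :: r2) = pvRowdiff r1 r2 + (if a ≠ b then 1 else 0) := by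
  simp only [pvRowdiff_char, List.zip_cons_cons, List.countP_cons, List.length_cons]
  have h0 : |((r1.length : Int) + 1 - ((r2.length : Int) + 1))| = |((r1.length : Int) - r2.length)| := by
    congr 1; ring
  push_cast
  rw [h0]
  by_cases h : a = b
  · rw [if_neg (by simp [h]), if_neg (by simp [h])]
    ring
  · rw [if_pos (by simp [h]), if_pos (by simp [h])]
    ring

lemma pvRowdiff_eq_zero (r1 r2 : List String) : pvRowdiff r1 r2 = 0 ↔ r1 = r2 := by
  induction r1 generalizing r2 with
  | nil => cases r2 <;> simp [pvRowdiff_nil_left] <;> omega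
  | cons a t ih =>
    cases r2 with
    | nil => simp [pvRowdiff_nil_right]; omega
    | cons b t2 =>
      rw [pvRowdiff_cons]
      have h1 : 0 ≤ pvRowdiff t t2 := by
        rw [pvRowdiff_char]; positivity
      constructor
      · intro h
        split_ifs at h with hab
        · omega
        · simp at hab
          simp [hab, (ih t2).mp (by omega)]
      · intro h
        injection h with h1 h2
        subst h1; subst h2
        rw [(ih t).mpr rfl]
        simp

lemma pvRowdiff_self (r : List String) : pvRowdiff r r = 0 :=
  (pvRowdiff_eq_zero r r).mpr rfl

lemma pvRowdiff_set (r1 r2 : List String) (k : Nat) (f : String) (hk : k < r1.length) :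
    pvRowdiff (r1.set k f) r2 =
      pvRowdiff r1 r2 +
        (if hk2 : k < r2.length then
          ((if f ≠ r2[k] then (1 : Int) else 0) - (if r1[k]'hk ≠ r2[k] then (1 : Int) else 0))
        else 0) := by
  induction r1 generalizing r2 k with
  | nil => simp at hk
  | cons a t ih =>
    cases r2 with
    | nil => simp [pvRowdiff_nil_right]
    | cons b t2 =>
      cases k with
      | zero =>
        simp only [List.set_cons_zero, pvRowdiff_cons, List.getElem_cons_zero, List.length_cons]
        rw [dif_pos (by omega : 0 < t2.length + 1)]
        ring_nf
      | succ k =>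
        simp only [List.set_cons_succ, pvRowdiff_cons, List.getElem_cons_succ, List.length_cons]
        rw [ih t2 k (by simpa using hk)]
        by_cases h2 : k < t2.length
        · rw [dif_pos h2, dif_pos (by omega : k + 1 < t2.length + 1)]
          ring_nf
        · rw [dif_neg h2, dif_neg (by omega : ¬ (k + 1 < t2.length + 1))]
          ring


def pvAcondL (g : List (List String)) (i : Int) : List (List String) :=
  PySem.List.slice ((PySem.List.slice? (PySem.List.slice g none (some i)) none none (-1)).getD [])
    none (some (((PySem.List.slice g (some i) none).length : Int)))

def pvAcondR (g : List (List String)) (i : Int) : List (List String) :=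
  PySem.List.slice (PySem.List.slice g (some i) none) none (some ((pvAcondL g i).length : Int))

lemma pvAcondL_eq (g : List (List String)) (i : Int) (h1 : 0 ≤ i) :
    pvAcondL g i = ((g.take i.toNat).reverse).take (g.length - i.toNat) := by
  unfold pvAcondL
  simp only [PySem.List.slice_to g h1, PySem.List.slice_from g h1,
    PySem.List.slice?_none_none_neg_one, Option.getD_some, List.length_drop]
  exact PySem.List.slice_to_natCast _ _

lemma pvAcondL_length (g : List (List String)) (i : Int) (h1 : 0 ≤ i) (h2 : i ≤ (g.length : Int)) :
    (pvAcondL g i).length = min i.toNat (g.length - i.toNat) := by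
  rw [pvAcondL_eq g i h1]
  simp only [List.length_take, List.length_reverse]
  omega

lemma pvAcondR_eq (g : List (List String)) (i : Int) (h1 : 0 ≤ i) (h2 : i ≤ (g.length : Int)) :
    pvAcondR g i = (g.drop i.toNat).take (min i.toNat (g.length - i.toNat)) := by
  unfold pvAcondR
  rw [pvAcondL_length g i h1 h2]
  simp only [PySem.List.slice_from g h1]
  exact PySem.List.slice_to_natCast _ _

lemma pvAcondL_map (g : List (List String)) (i : Int) (h1 : 0 ≤ i) (h2 : i ≤ (g.length : Int)) :
    pvAcondL g i = (List.range (min i.toNat (g.length - i.toNat))).map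
      (fun t => g.getD (i.toNat - 1 - t) []) := by
  have hin : i.toNat ≤ g.length := by omega
  rw [pvAcondL_eq g i h1]
  apply List.ext_getElem
  · simp only [List.length_take, List.length_reverse, List.length_map, List.length_range]
    omega
  · intro t ht1 ht2
    have ht : t < min i.toNat (g.length - i.toNat) := by
      simp only [List.length_take, List.length_reverse] at ht1; omega
    rw [List.getElem_take, List.getElem_reverse, List.getElem_take, List.getElem_map,
        List.getElem_range]
    rw [List.getD_eq_getElem]
    · congr 1
      simp only [List.length_take]
      omega
    · omega

lemma pvAcondR_map (g : List (List String)) (i : Int) (h1 : 0 ≤ i) (h2 : i ≤ (g.length : Int)) :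
    pvAcondR g i = (List.range (min i.toNat (g.length - i.toNat))).map
      (fun t => g.getD (i.toNat + t) []) := by
  have hin : i.toNat ≤ g.length := by omega
  rw [pvAcondR_eq g i h1 h2]
  apply List.ext_getElem
  · simp only [List.length_take, List.length_drop, List.length_map, List.length_range]
    omega
  · intro t ht1 ht2
    have ht : t < min i.toNat (g.length - i.toNat) := by
      simp only [List.length_take, List.length_drop] at ht1; omega
    have hlt : i.toNat + t < g.length := by omega
    rw [List.getElem_take, List.getElem_drop, List.getElem_map, List.getElem_range,
        List.getD_eq_getElem _ _ hlt]

lemma pvAcond_iff (g : List (List String)) (i : Int) (h1 : 0 ≤ i) (h2 : i ≤ (g.length : Int)) :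
    pvAcondL g i = pvAcondR g i ↔
      ∀ t : Nat, t < min i.toNat (g.length - i.toNat) →
        g.getD (i.toNat - 1 - t) [] = g.getD (i.toNat + t) [] := by
  rw [pvAcondL_map g i h1 h2, pvAcondR_map g i h1 h2, List.map_inj_left]
  simp [List.mem_range]

lemma getD_set_of_lt {α : Type} (l : List α) (i p : Nat) (a d : α) (h : i < l.length) :
    (l.set i a).getD p d = if p = i then a else l.getD p d := by
  rcases Nat.lt_or_ge p l.length with hp | hp
  · rw [List.getD_eq_getElem _ _ (by simpa using hp), List.getElem_set]
    by_cases hpi : p = i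
    · simp [hpi]
    · rw [if_neg (fun hh => hpi hh.symm), if_neg hpi, List.getD_eq_getElem _ _ hp]
  · rw [if_neg (by omega), List.getD_eq_default _ _ (by simpa using hp),
      List.getD_eq_default _ _ hp]

-- the per-pass invariant: diffj holds the exact mismatch counts against row j
def pvAgree (diffj : List Int) (grid : List (List String)) (jN : Nat) : Prop :=
  diffj.length = grid.length ∧
  ∀ q : Nat, q < grid.length →
    diffj.getD q 0 = pvRowdiff (grid.getD jN []) (grid.getD q [])

lemma pvDiffjInit_agree (grid : List (List String)) (jN : Nat) :
    pvAgree (grid.map (fun r => pvRowdiff (PySem.List.pyGetD grid (jN : Int) []) r)) grid jN := by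
  constructor
  · simp
  · intro q hq
    rw [List.getD_eq_getElem _ _ (by simpa using hq), List.getElem_map]
    simp only [PySem.List.pyGetD_natCast]
    rw [List.getD_eq_getElem _ _ hq]

-- what toggle's update loop does to each entry
lemma pvFold_spec (grid : List (List String)) (j k : Int) (nw old : String) (n : Int) :
    ∀ (fuel : Nat) (a : Int) (d : List Int), (n - a).toNat ≤ fuel → 0 ≤ a → n ≤ (d.length : Int) →
      (((PySem.List.pyRange a n 1).foldl (pvStep grid j k nw old) d).length = d.length) ∧
      (∀ qN : Nat, qN < d.length →
        ((PySem.List.pyRange a n 1).foldl (pvStep grid j k nw old) d).getD qN 0 =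
          if a ≤ (qN : Int) ∧ (qN : Int) < n ∧ (qN : Int) ≠ j ∧
             k < ((PySem.List.pyGetD grid (qN : Int) []).length : Int)
          then d.getD qN 0
            + ((if nw ≠ PySem.List.pyGetD (PySem.List.pyGetD grid (qN : Int) []) k "" then 1 else 0)
               - (if old ≠ PySem.List.pyGetD (PySem.List.pyGetD grid (qN : Int) []) k "" then 1 else 0))
          else d.getD qN 0) := by
  intro fuel
  induction fuel with
  | zero =>
    intro a d hfuel ha hlen
    rw [PySem.List.pyRange_one_eq_nil (by omega)]
    exact ⟨rfl, fun qN hq => by rw [if_neg (by omega), List.foldl_nil]⟩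
  | succ fuel ih =>
    intro a d hfuel ha hlen
    by_cases hab : a < n
    · rw [PySem.List.pyRange_one_cons hab, List.foldl_cons]
      have haN : a = ((a.toNat : Nat) : Int) := by omega
      set d1 := pvStep grid j k nw old d a with hd1
      have hd1len : d1.length = d.length := by
        rw [hd1]; unfold pvStep
        split
        · simp [PySem.List.length_pySetD]
        · rfl
      have hd1_eq : d1.getD a.toNat 0 =
          if a ≠ j ∧ k < ((PySem.List.pyGetD grid a []).length : Int)
          then d.getD a.toNat 0
            + ((if nw ≠ PySem.List.pyGetD (PySem.List.pyGetD grid a []) k "" then 1 else 0)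
               - (if old ≠ PySem.List.pyGetD (PySem.List.pyGetD grid a []) k "" then 1 else 0))
          else d.getD a.toNat 0 := by
        rw [hd1]; unfold pvStep
        by_cases hC : a ≠ j ∧ k < ((PySem.List.pyGetD grid a []).length : Int)
        · rw [if_pos hC, haN, PySem.List.pySetD_natCast]
          simp only [Int.toNat_natCast]
          rw [getD_set_of_lt d a.toNat a.toNat _ 0 (by omega), if_pos rfl]
          simp only [PySem.List.pyGetD_natCast]
          have hC' := hC
          rw [haN] at hC'
          simp only [PySem.List.pyGetD_natCast] at hC'
          rw [if_pos hC']
        · rw [if_neg hC, if_neg hC]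
      have hd1_ne : ∀ qN : Nat, qN ≠ a.toNat → d1.getD qN 0 = d.getD qN 0 := by
        intro qN hqa
        rw [hd1]; unfold pvStep
        split
        · rw [haN, PySem.List.pySetD_natCast]
          rw [getD_set_of_lt d a.toNat qN _ 0 (by omega), if_neg hqa]
        · rfl
      obtain ⟨ihlen, ihget⟩ := ih (a + 1) d1 (by omega) (by omega) (by omega)
      refine ⟨by rw [ihlen, hd1len], ?_⟩
      intro qN hq
      rw [ihget qN (by omega)]
      by_cases hqa : qN = a.toNat
      · subst hqa
        rw [hd1_eq, ← haN]
        generalize ((if nw ≠ PySem.List.pyGetD (PySem.List.pyGetD grid a []) k "" then (1 : Int) else 0)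
            - (if old ≠ PySem.List.pyGetD (PySem.List.pyGetD grid a []) k "" then (1 : Int) else 0)) = del
        generalize ((PySem.List.pyGetD grid a []).length : Int) = L
        split_ifs <;> omega
      · have hqa' : ¬((qN : Int) = a) := fun h => hqa (by omega)
        rw [hd1_ne qN hqa]
        generalize ((if nw ≠ PySem.List.pyGetD (PySem.List.pyGetD grid (qN : Int) []) k "" then (1 : Int) else 0)
            - (if old ≠ PySem.List.pyGetD (PySem.List.pyGetD grid (qN : Int) []) k "" then (1 : Int) else 0)) = del
        generalize ((PySem.List.pyGetD grid (qN : Int) []).length : Int) = L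
        split_ifs <;> omega
    · rw [PySem.List.pyRange_one_eq_nil (by omega)]
      exact ⟨rfl, fun qN hq => by rw [if_neg (by omega), List.foldl_nil]⟩

lemma pvFlip_eq_oposite (c : String) : pvFlip c = pvOposite c := rfl

lemma pvToggle_fst (j n : Int) (grid : List (List String)) (diffj : List Int) (k : Int) :
    (pvToggle j n grid diffj k).1 = pvA2flip grid j k := rfl

lemma pvToggle_fst_set (n : Int) (grid : List (List String)) (diffj : List Int)
    (jN kN : Nat) (hj : jN < grid.length) :
    (pvToggle (jN : Int) n grid diffj (kN : Int)).1 =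
      grid.set jN ((grid.getD jN []).set kN (pvFlip ((grid.getD jN []).getD kN ""))) := by
  rw [pvToggle_fst]
  unfold pvA2flip
  simp only [PySem.List.pyGetD_natCast, PySem.List.pySetD_natCast, pvFlip_eq_oposite]

lemma pvToggle_agree (grid : List (List String)) (diffj : List Int) (jN kN : Nat) (n : Int)
    (hn : n = (grid.length : Int))
    (hj : jN < grid.length) (hk : kN < (grid.getD jN []).length)
    (hag : pvAgree diffj grid jN) :
    pvAgree (pvToggle (jN : Int) n grid diffj (kN : Int)).2
      ((pvToggle (jN : Int) n grid diffj (kN : Int)).1) jN := by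
  obtain ⟨hlen, hget⟩ := hag
  set row := grid.getD jN [] with hrow
  set old := row.getD kN "" with hold
  set nw := pvFlip old with hnw
  have hfst := pvToggle_fst_set n grid diffj jN kN hj
  set grid' := grid.set jN (row.set kN nw) with hgrid'
  have hsnd : (pvToggle (jN : Int) n grid diffj (kN : Int)).2 =
      (PySem.List.pyRange 0 n 1).foldl (pvStep grid' (jN : Int) (kN : Int) nw old) diffj := by
    unfold pvToggle
    simp only [PySem.List.pyGetD_natCast, PySem.List.pySetD_natCast]
    rw [← hrow, ← hold, ← hnw, ← hgrid']
  have hlen' : grid'.length = grid.length := by simp [hgrid']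
  obtain ⟨hflen, hfget⟩ := pvFold_spec grid' (jN : Int) (kN : Int) nw old n
    ((n - 0).toNat) 0 diffj (le_refl _) (by omega) (by omega)
  constructor
  · rw [hsnd, hfst, hflen, hlen, hlen']
  · intro q hq
    rw [hfst] at hq ⊢
    rw [hlen'] at hq
    rw [hsnd, hfget q (by omega)]
    have hgj : grid'.getD jN [] = row.set kN nw := by
      rw [hgrid', getD_set_of_lt grid jN jN _ [] hj, if_pos rfl]
    by_cases hqj : q = jN
    · rw [if_neg (by
        rintro ⟨_, _, h3, _⟩
        exact h3 (by exact_mod_cast hqj))]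
      rw [hqj, hget jN hj, ← hrow, pvRowdiff_self, hgj, pvRowdiff_self]
    · have hgq : grid'.getD q [] = grid.getD q [] := by
        rw [hgrid', getD_set_of_lt grid jN q _ [] hj, if_neg hqj]
      have hset : pvRowdiff (row.set kN nw) (grid.getD q []) =
          pvRowdiff row (grid.getD q []) +
            (if hk2 : kN < (grid.getD q []).length then
              ((if nw ≠ (grid.getD q [])[kN] then (1 : Int) else 0)
               - (if row[kN]'hk ≠ (grid.getD q [])[kN] then (1 : Int) else 0))
            else 0) := pvRowdiff_set row (grid.getD q []) kN nw hk
      rw [hgj, hgq, hset, hget q hq]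
      have hrk : row[kN]'hk = old := by rw [hold, List.getD_eq_getElem _ _ hk]
      by_cases h2 : kN < (grid.getD q []).length
      · rw [dif_pos h2, if_pos (by
          refine ⟨by omega, by omega, by exact_mod_cast hqj, ?_⟩
          simp only [PySem.List.pyGetD_natCast, hgq]
          exact_mod_cast h2)]
        simp only [PySem.List.pyGetD_natCast, hgq]
        rw [List.getD_eq_getElem _ _ h2, hrk]
      · rw [dif_neg h2, if_neg (by
          rintro ⟨_, _, _, h4⟩
          simp only [PySem.List.pyGetD_natCast, hgq] at h4
          omega)]
        ring

-- the condition pvBok checks for one mirror pair (p, q)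
def pvPairCond (j : Int) (diffj : List Int) (grid : List (List String)) (p q : Int) : Prop :=
  if p = j ∨ q = j then PySem.List.pyGetD diffj (if p = j then q else p) 0 = 0
  else PySem.List.pyGetD grid p [] = PySem.List.pyGetD grid q []

lemma pvBok_iff (j i : Int) (diffj : List Int) (grid : List (List String)) (ts : List Int) :
    pvBok j i diffj grid ts = true ↔ ∀ t ∈ ts, pvPairCond j diffj grid (i - 1 - t) (i + t) := by
  induction ts with
  | nil => simp [pvBok]
  | cons t ts ih =>
    have hbody : pvBok j i diffj grid (t :: ts) =
        if (if i - 1 - t = j ∨ i + t = j then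
              PySem.List.pyGetD diffj (if i - 1 - t = j then i + t else i - 1 - t) 0 = 0
            else PySem.List.pyGetD grid (i - 1 - t) [] = PySem.List.pyGetD grid (i + t) [])
          then pvBok j i diffj grid ts else false := rfl
    rw [hbody, List.forall_mem_cons]
    by_cases hp : pvPairCond j diffj grid (i - 1 - t) (i + t)
    · have hp' := hp
      unfold pvPairCond at hp'
      rw [if_pos hp', ih]
      exact ⟨fun h => ⟨hp, h⟩, fun h => h.2⟩
    · have hp' := hp
      unfold pvPairCond at hp'
      rw [if_neg hp']
      simp only [Bool.false_eq_true, false_iff]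
      rintro ⟨h1, _⟩
      exact hp h1

lemma pvPair_iff (grid : List (List String)) (jN : Nat) (diffj : List Int)
    (hag : pvAgree diffj grid jN)
    (pN qN : Nat) (hp : pN < grid.length) (hq : qN < grid.length) :
    pvPairCond (jN : Int) diffj grid (pN : Int) (qN : Int) ↔
      grid.getD pN [] = grid.getD qN [] := by
  obtain ⟨hlen, hget⟩ := hag
  unfold pvPairCond
  by_cases hpj : pN = jN
  · rw [if_pos (Or.inl (by exact_mod_cast hpj)), if_pos (by exact_mod_cast hpj)]
    rw [PySem.List.pyGetD_natCast, hget qN hq, pvRowdiff_eq_zero, hpj]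
  · have hpj' : ¬ ((pN : Int) = (jN : Int)) := by exact_mod_cast hpj
    by_cases hqj : qN = jN
    · rw [if_pos (Or.inr (by exact_mod_cast hqj)), if_neg hpj']
      rw [PySem.List.pyGetD_natCast, hget pN hp, pvRowdiff_eq_zero, hqj]
      exact ⟨fun h => h.symm, fun h => h.symm⟩
    · rw [if_neg (by
        rintro (h | h)
        · exact hpj' h
        · exact hqj (by exact_mod_cast h))]
      simp only [PySem.List.pyGetD_natCast]

lemma pvGMLloop_cons (g : List (List String)) (i : Int) (rest : List Int) :
    pvGMLloop g (i :: rest) =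
      if pvAcondL g i = pvAcondR g i then i else pvGMLloop g rest := rfl

lemma pvGML_findm (g1 : List (List String)) (jN : Nat) (diffj : List Int)
    (hag : pvAgree diffj g1 jN) :
    ∀ l : List Int, (∀ i ∈ l, 1 ≤ i ∧ i < (g1.length : Int)) →
      pvGMLloop g1 l = pvBfindm (jN : Int) (g1.length : Int) diffj g1 l := by
  intro l
  induction l with
  | nil => intro _; rfl
  | cons i rest ih =>
    intro hmem
    obtain ⟨hi1, hi2⟩ := hmem i (by simp)
    have h0 : (0 : Int) ≤ i := by omega
    have h2' : i ≤ (g1.length : Int) := by omega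
    rw [pvGMLloop_cons, pvBfindm]
    have hcond : (pvAcondL g1 i = pvAcondR g1 i) ↔
        (pvBok (jN : Int) i diffj g1
          (PySem.List.pyRange 0 (min i ((g1.length : Int) - i)) 1) = true) := by
      rw [pvAcond_iff g1 i h0 h2', pvBok_iff]
      constructor
      · intro h t hmemt
        rw [PySem.List.mem_pyRange_one] at hmemt
        obtain ⟨ht0, ht1⟩ := hmemt
        set tN := t.toNat with htN
        have htm : tN < min i.toNat (g1.length - i.toNat) := by omega
        have hpq : i - 1 - t = ((i.toNat - 1 - tN : Nat) : Int) ∧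
            i + t = ((i.toNat + tN : Nat) : Int) := by constructor <;> omega
        rw [hpq.1, hpq.2]
        rw [pvPair_iff g1 jN diffj hag (i.toNat - 1 - tN) (i.toNat + tN) (by omega) (by omega)]
        exact h tN htm
      · intro h tN htm
        have hp1 : i - 1 - ((tN : Nat) : Int) = ((i.toNat - 1 - tN : Nat) : Int) := by omega
        have hp2 : i + ((tN : Nat) : Int) = ((i.toNat + tN : Nat) : Int) := by omega
        have := h ((tN : Nat) : Int) (by rw [PySem.List.mem_pyRange_one]; omega)
        rw [hp1, hp2] at this
        rw [pvPair_iff g1 jN diffj hag (i.toNat - 1 - tN) (i.toNat + tN) (by omega) (by omega)] at this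
        exact this
    by_cases hc : pvAcondL g1 i = pvAcondR g1 i
    · rw [if_pos hc, if_pos (hcond.mp hc)]
    · rw [if_neg hc, if_neg (fun hb => hc (hcond.mpr hb))]
      exact ih (fun i' hi' => hmem i' (by simp [hi']))

lemma pvA2flip_len (g : List (List String)) (j k : Int) :
    (pvA2flip g j k).length = g.length := by
  unfold pvA2flip
  simp [PySem.List.length_pySetD]

lemma pvA2kloop_len (o : Int) (j : Int) :
    ∀ (ks : List Int) (g : List (List String)), ((pvA2kloop o j ks g).1).length = g.length := by
  intro ks
  induction ks with
  | nil => intro g; rfl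
  | cons k ks ih =>
    intro g
    rw [pvA2kloop]
    by_cases hc : pvGetMirroredLines (pvA2flip g j k) > 0 ∧ pvGetMirroredLines (pvA2flip g j k) ≠ o
    · simp only [if_pos hc]
      rw [pvA2flip_len, pvA2flip_len]
    · simp only [if_neg hc]
      rw [ih, pvA2flip_len, pvA2flip_len]

lemma pvA2kloop_cons (o j k : Int) (ks : List Int) (g : List (List String)) :
    pvA2kloop o j (k :: ks) g =
      if pvGetMirroredLines (pvA2flip g j k) > 0 ∧ pvGetMirroredLines (pvA2flip g j k) ≠ o
      then (pvA2flip (pvA2flip g j k) j k, some (pvGetMirroredLines (pvA2flip g j k)))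
      else pvA2kloop o j ks (pvA2flip (pvA2flip g j k) j k) := rfl

lemma pvBkloop_cons (o n j k : Int) (ks : List Int) (grid : List (List String)) (diffj : List Int) :
    pvBkloop o n j (k :: ks) grid diffj =
      (let s1 := pvToggle j n grid diffj k
       let m := pvBfindm j n s1.2 s1.1 (PySem.List.pyRange 1 n 1)
       let s2 := pvToggle j n s1.1 s1.2 k
       if m > 0 ∧ m ≠ o then (s2.1, s2.2, some m)
       else pvBkloop o n j ks s2.1 s2.2) := rfl

lemma pvKloop_eq (o : Int) (jN : Nat) :
    ∀ (ks : List Int) (grid : List (List String)) (diffj : List Int),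
      jN < grid.length →
      (∀ k ∈ ks, 0 ≤ k ∧ k < ((grid.getD jN []).length : Int)) →
      pvAgree diffj grid jN →
      (pvA2kloop o (jN : Int) ks grid).2 =
        (pvBkloop o (grid.length : Int) (jN : Int) ks grid diffj).2.2 ∧
      ((pvA2kloop o (jN : Int) ks grid).2 = none →
        (pvA2kloop o (jN : Int) ks grid).1 =
          (pvBkloop o (grid.length : Int) (jN : Int) ks grid diffj).1) := by
  intro ks
  induction ks with
  | nil => intro grid diffj _ _ _; exact ⟨rfl, fun _ => rfl⟩
  | cons k ks ih =>
    intro grid diffj hj hks hag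
    obtain ⟨hk0, hklt⟩ := hks k (by simp)
    have hkcast : k = ((k.toNat : Nat) : Int) := by omega
    set kN : Nat := k.toNat with hkN
    have hk : kN < (grid.getD jN []).length := by omega
    rw [pvA2kloop_cons, pvBkloop_cons, hkcast]
    simp only [pvToggle_fst]
    set g1 := pvA2flip grid (jN : Int) ((kN : Nat) : Int) with hg1
    set d1 := (pvToggle (jN : Int) (grid.length : Int) grid diffj ((kN : Nat) : Int)).2 with hd1
    set g2 := pvA2flip g1 (jN : Int) ((kN : Nat) : Int) with hg2
    set d2 := (pvToggle (jN : Int) (grid.length : Int) g1 d1 ((kN : Nat) : Int)).2 with hd2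
    have hg1len : g1.length = grid.length := pvA2flip_len _ _ _
    have hag1 : pvAgree d1 g1 jN := by
      have := pvToggle_agree grid diffj jN kN (grid.length : Int) rfl hj hk hag
      rwa [pvToggle_fst, ← hg1] at this
    have hg2len : g2.length = grid.length := by rw [hg2, pvA2flip_len, hg1len]
    have hg1row : (g1.getD jN []).length = (grid.getD jN []).length := by
      rw [hg1]
      unfold pvA2flip
      simp only [PySem.List.pyGetD_natCast, PySem.List.pySetD_natCast]
      rw [getD_set_of_lt grid jN jN _ [] hj, if_pos rfl, List.length_set]
    have hag2 : pvAgree d2 g2 jN := by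
      have := pvToggle_agree g1 d1 jN kN (grid.length : Int) (by rw [hg1len])
        (by omega) (by omega) hag1
      rwa [pvToggle_fst, ← hg2] at this
    have hg2row : (g2.getD jN []).length = (grid.getD jN []).length := by
      rw [hg2]
      unfold pvA2flip
      simp only [PySem.List.pyGetD_natCast, PySem.List.pySetD_natCast]
      rw [getD_set_of_lt g1 jN jN _ [] (by omega), if_pos rfl, List.length_set, hg1row]
    have hm : pvGetMirroredLines g1 =
        pvBfindm (jN : Int) (grid.length : Int) d1 g1 (PySem.List.pyRange 1 (grid.length : Int) 1) := by
      unfold pvGetMirroredLines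
      rw [hg1len]
      rw [← hg1len]
      exact pvGML_findm g1 jN d1 hag1 _
        (fun i hi => by rw [PySem.List.mem_pyRange_one] at hi; rw [hg1len] at hi ⊢; omega)
    rw [← hm]
    by_cases hcond : pvGetMirroredLines g1 > 0 ∧ pvGetMirroredLines g1 ≠ o
    · rw [if_pos hcond, if_pos hcond]
      exact ⟨rfl, fun h => by simp at h⟩
    · rw [if_neg hcond, if_neg hcond]
      have hih := ih g2 d2 (by omega)
        (fun k' hk' => by
          have := hks k' (by simp [hk'])
          rwa [hg2row])
        hag2
      rw [hg2len] at hih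
      exact hih

lemma pvA2jloop_cons (o j : Int) (js : List Int) (g : List (List String)) :
    pvA2jloop o (j :: js) g =
      match pvA2kloop o j (PySem.List.pyRange 0 (((PySem.List.pyGetD g j []) : List String).length : Int) 1) g with
      | (_, some m) => m
      | (g', none) => pvA2jloop o js g' := rfl

lemma pvBjloop_cons (o n j : Int) (js : List Int) (grid : List (List String)) :
    pvBjloop o n (j :: js) grid =
      match pvBkloop o n j
          (PySem.List.pyRange 0 (((PySem.List.pyGetD grid j []) : List String).length : Int) 1)
          grid (grid.map (fun r => pvRowdiff (PySem.List.pyGetD grid j []) r)) with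
      | (_, _, some m) => m
      | (grid', _, none) => pvBjloop o n js grid' := rfl

lemma pvJloop_eq (o : Int) :
    ∀ (js : List Int) (grid : List (List String)),
      (∀ j ∈ js, ∃ jN : Nat, j = (jN : Int) ∧ jN < grid.length) →
      pvA2jloop o js grid = pvBjloop o (grid.length : Int) js grid := by
  intro js
  induction js with
  | nil => intro grid _; rfl
  | cons j js ih =>
    intro grid hjs
    obtain ⟨jN, hjcast, hjlt⟩ := hjs j (by simp)
    subst hjcast
    rw [pvA2jloop_cons, pvBjloop_cons]
    obtain ⟨h2, h1⟩ := pvKloop_eq o jN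
      (PySem.List.pyRange 0 (((PySem.List.pyGetD grid (jN : Int) []) : List String).length : Int) 1)
      grid (grid.map (fun r => pvRowdiff (PySem.List.pyGetD grid (jN : Int) []) r)) hjlt
      (fun k hk => by
        rw [PySem.List.mem_pyRange_one] at hk
        simp only [PySem.List.pyGetD_natCast] at hk
        exact hk)
      (pvDiffjInit_agree grid jN)
    have hlenA := pvA2kloop_len o (jN : Int)
      (PySem.List.pyRange 0 (((PySem.List.pyGetD grid (jN : Int) []) : List String).length : Int) 1)
      grid
    rcases hA : pvA2kloop o (jN : Int)
      (PySem.List.pyRange 0 (((PySem.List.pyGetD grid (jN : Int) []) : List String).length : Int) 1)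
      grid with ⟨gA, mA⟩
    rcases hB : pvBkloop o (grid.length : Int) (jN : Int)
      (PySem.List.pyRange 0 (((PySem.List.pyGetD grid (jN : Int) []) : List String).length : Int) 1)
      grid (grid.map (fun r => pvRowdiff (PySem.List.pyGetD grid (jN : Int) []) r)) with ⟨gB, dB, mB⟩
    rw [hA, hB] at h2 h1
    rw [hA] at hlenA
    simp only at h2 h1 hlenA
    cases mA with
    | none =>
      cases mB with
      | none =>
        have hgr : gA = gB := h1 rfl
        show pvA2jloop o js gA = pvBjloop o (grid.length : Int) js gB
        rw [← hgr]
        have := ih gA (fun j' hj' => by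
          obtain ⟨jN', hc, hl⟩ := hjs j' (by simp [hj'])
          exact ⟨jN', hc, by omega⟩)
        rw [hlenA] at this
        exact this
      | some m' => simp at h2
    | some m =>
      cases mB with
      | none => simp at h2
      | some m' =>
        have hmm : m = m' := by simpa using h2
        show m = m'
        exact hmm

-- ===== VERDICT (by name: the statement is the Claim_ definition above) =====
theorem GetMirroredLines2_spec : Claim_equal_GetMirroredLines2 := by
  intro mirrors o hdom hpre
  have hn : 1 ≤ mirrors.length := by
    cases mirrors with
    | nil => exact absurd rfl hpre
    | cons a l => simp
  unfold Spec_GetMirroredLines2 GetMirroredLines2 GetMirroredLines2_alt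
  apply pvJloop_eq
  intro j hj
  simp only [List.mem_cons, List.not_mem_nil, or_false] at hj
  rcases hj with h | h
  · exact ⟨0, by simp [h], by omega⟩
  · exact ⟨mirrors.length - 1, by omega, by omega⟩
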